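-- pv_equiv track=rewrite | github.com/Jaykim1234/Python | 코딩테스트/programmers/스텍/프린터.py | solution
-- ===== SOURCE A (Python) =====
-- def solution(priorities, location):
--
--     answer_lst = []
--
--     while priorities[0] < max(priorities):
--         if location > 0:
--             location -= 1
--             priorities.append(priorities.pop(0))
--         else:
--             location = len(priorities) -1
--             priorities.append(priorities.pop(0))
--
--     answer_lst.append(priorities[0])
--
--     return location+1
-- ===== SOURCE B (Python) =====
-- def solution(priorities, location):
--     # Closed form: the loop rotates exactly k = index of the first maximum times,
--     # decrementing location with wraparound 0 -> n-1 at each rotation.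
--     n = len(priorities)
--     k = priorities.index(max(priorities))
--     if k == 0 or location >= k:
--         return location - k + 1
--     if location <= 0:
--         return n - k + 1
--     return n - k + location + 1
-- ===== Notes on version B (the rewrite author's own statement) =====
-- stated objective: faster
-- what changed: Replaces the rotate-until-max-at-front while loop (which recomputes max(priorities) and rotates the list on every iteration) by a closed form: find the first index k of the maximum once and compute the wrapped location (location-k with 0->n-1 wraparound) arithmetically.
import Mathlib
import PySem

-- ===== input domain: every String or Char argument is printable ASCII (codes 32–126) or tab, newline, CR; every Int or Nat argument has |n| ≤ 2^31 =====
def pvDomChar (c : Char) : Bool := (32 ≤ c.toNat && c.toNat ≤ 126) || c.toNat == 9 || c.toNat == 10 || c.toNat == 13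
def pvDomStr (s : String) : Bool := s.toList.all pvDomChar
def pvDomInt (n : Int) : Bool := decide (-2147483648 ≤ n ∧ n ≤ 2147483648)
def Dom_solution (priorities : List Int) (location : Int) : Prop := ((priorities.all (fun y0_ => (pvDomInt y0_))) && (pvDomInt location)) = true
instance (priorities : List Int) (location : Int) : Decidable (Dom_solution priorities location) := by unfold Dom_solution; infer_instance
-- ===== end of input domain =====

-- B replaces A's rotate-until-max-at-front loop by a closed form on the first index of the
-- maximum (objective: faster, O(n) vs O(n^2)). A mutates its `priorities` argument in place
-- (pop/append); B does not: the equivalence proved here is about the RETURN value only.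

-- ===== PORT A =====
-- while priorities[0] < max(priorities): rotate, updating location; fuel = length is enough,
-- since the loop runs exactly (first index of the max) < length times.
def solutionLoop (fuel : Nat) (priorities : List Int) (location : Int) : List Int × Int :=
  match fuel with
  | 0 => (priorities, location)
  | fuel + 1 =>
    match PySem.List.pyGet? priorities 0, PySem.List.max? priorities (fun x => x) with
    | some h, some m =>
      if h < m then
        -- priorities.append(priorities.pop(0))
        if location > 0 then
          solutionLoop fuel (priorities.drop 1 ++ priorities.take 1) (location - 1)
        else
          solutionLoop fuel (priorities.drop 1 ++ priorities.take 1) ((priorities.length : Int) - 1)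
      else (priorities, location)
    | _, _ => (priorities, location)

def solution (priorities : List Int) (location : Int) : Int :=
  (solutionLoop priorities.length priorities location).2 + 1

-- ===== PORT B =====
def solution_alt (priorities : List Int) (location : Int) : Int :=
  let n : Int := priorities.length
  match PySem.List.max? priorities (fun x => x) with
  | none => 0   -- unreachable under Pre_: Python B raises on []
  | some m =>
    match PySem.List.index? priorities m with
    | none => 0 -- unreachable: the max is a member
    | some k =>
      if k = 0 ∨ location ≥ (k : Int) then location - (k : Int) + 1
      else if location ≤ 0 then n - (k : Int) + 1
      else n - (k : Int) + location + 1

-- ===== PRECONDITION & SPEC =====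
-- A raises IndexError (priorities[0] / max of empty) iff priorities = []; it returns on every
-- other input, for ANY integer location.
def Pre_solution (priorities : List Int) (location : Int) : Prop := priorities ≠ []
instance (priorities : List Int) (location : Int) : Decidable (Pre_solution priorities location) := by
  unfold Pre_solution; infer_instance
def pvWitness_solution : List Int × Int := ([2, 1, 3, 2], 2)

def Spec_solution (priorities : List Int) (location : Int) (out : Int) : Prop := out = solution_alt priorities location
instance (priorities : List Int) (location : Int) (out : Int) : Decidable (Spec_solution priorities location out) := by unfold Spec_solution; infer_instance

-- ===== CLAIM (what is proved, stated in full; the proofs are below) =====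
def Claim_equal_solution : Prop := ∀ (priorities : List Int) (location : Int), Dom_solution priorities location → Pre_solution priorities location → Spec_solution priorities location (solution priorities location)

-- ===== LEMMAS AND PROOFS =====

-- value of the Python max is the unique upper bound that is a member
lemma max_val_unique (p : List Int) (m m' : Int)
    (h : PySem.List.max? p (fun x => x) = some m)
    (hm : m' ∈ p) (hub : ∀ y ∈ p, y ≤ m') : m = m' := by
  have h1 := PySem.List.max?_isMax h m' hm
  have h2 := hub m (PySem.List.max?_mem h)
  omega

lemma loop_spec : ∀ (k fuel : Nat) (p : List Int) (loc m : Int),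
    PySem.List.max? p (fun x => x) = some m →
    PySem.List.index? p m = some k →
    k ≤ fuel →
    (solutionLoop fuel p loc).2 =
      if k = 0 ∨ loc ≥ (k : Int) then loc - k
      else if loc ≤ 0 then (p.length : Int) - k
      else (p.length : Int) - k + loc := by
  intro k
  induction k with
  | zero =>
    intro fuel p loc m hmax hidx _
    rcases (PySem.List.index?_eq_some_iff _ _ _).1 hidx with ⟨pre, suf, hp, hlen, -⟩
    have hpre : pre = [] := List.eq_nil_of_length_eq_zero hlen
    subst hpre; simp only [List.nil_append] at hp; subst hp
    cases fuel with
    | zero => simp [solutionLoop]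
    | succ f =>
      have hget : PySem.List.pyGet? (m :: suf) 0 = some m := by
        simp [PySem.List.pyGet?, PySem.List.pyIdx?]
      simp [solutionLoop, hmax]
  | succ k' ih =>
    intro fuel p loc m hmax hidx hfuel
    rcases (PySem.List.index?_eq_some_iff _ _ _).1 hidx with ⟨pre, suf, hp, hlen, hnot⟩
    cases fuel with
    | zero => omega
    | succ f =>
      -- p = h :: t with h the head of pre
      cases pre with
      | nil => simp at hlen
      | cons h t =>
        have hp' : p = h :: (t ++ m :: suf) := by simp [hp]
        have hhm : h ∈ p := by rw [hp']; exact List.mem_cons_self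
        have hle : h ≤ m := PySem.List.max?_isMax hmax h hhm
        have hne : h ≠ m := fun he => hnot (he ▸ List.mem_cons_self)
        have hlt : h < m := lt_of_le_of_ne hle hne
        have hget : PySem.List.pyGet? p 0 = some h := by
          rw [hp']; simp [PySem.List.pyGet?, PySem.List.pyIdx?]
          rw [if_pos (by omega)]; simp
        -- the rotated list
        set r : List Int := (t ++ m :: suf) ++ [h] with hr
        have hdrop : p.drop 1 ++ p.take 1 = r := by rw [hp']; simp [hr]
        have hmemr : ∀ x : Int, x ∈ r ↔ x ∈ p := by
          intro x; rw [hp', hr]; simp [or_comm, or_assoc, or_left_comm]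
        have hrne : r ≠ [] := by simp [hr]
        -- max of the rotated list is still m
        have hmaxr : PySem.List.max? r (fun x => x) = some m := by
          cases hm2 : PySem.List.max? r (fun x : Int => x) with
          | none => exact absurd ((PySem.List.max?_eq_none_iff _ _).1 hm2) hrne
          | some m2 =>
            have : m2 = m := by
              refine max_val_unique r m2 m hm2 ((hmemr m).2 (PySem.List.max?_mem hmax)) ?_
              intro y hy; exact PySem.List.max?_isMax hmax y ((hmemr y).1 hy)
            rw [this]
        -- first index of m in r is k'
        have hidxr : PySem.List.index? r m = some k' := by
          refine (PySem.List.index?_eq_some_iff _ _ _).2 ⟨t, suf ++ [h], ?_, ?_, ?_⟩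
          · simp [hr]
          · have : (h :: t).length = k' + 1 := hlen
            simpa using this
          · intro hmt; exact hnot (List.mem_cons_of_mem h hmt)
        have hlenr : (r.length : Int) = (p.length : Int) := by
          rw [hp', hr]; simp; omega
        have hlen' : t.length = k' := by simpa using hlen
        have hplen : p.length = t.length + suf.length + 2 := by
          rw [hp']; simp [List.length_append]; omega
        have hklt : (k' : Int) + 1 < (p.length : Int) := by omega
        have hstep : solutionLoop (f + 1) p loc =
            if loc > 0 then solutionLoop f r (loc - 1)
            else solutionLoop f r ((p.length : Int) - 1) := by
          rw [show solutionLoop (f + 1) p loc =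
              if h < m then
                if loc > 0 then solutionLoop f (p.drop 1 ++ p.take 1) (loc - 1)
                else solutionLoop f (p.drop 1 ++ p.take 1) ((p.length : Int) - 1)
              else (p, loc) from by simp [solutionLoop, hget, hmax]]
          rw [if_pos hlt, hdrop]
        rw [hstep]
        by_cases hl : loc > 0
        · rw [if_pos hl, ih f r (loc - 1) m hmaxr hidxr (by omega), hlenr]
          split_ifs <;> simp only [false_or] at * <;> omega
        · rw [if_neg hl, ih f r ((p.length : Int) - 1) m hmaxr hidxr (by omega), hlenr]
          split_ifs <;> simp only [false_or] at * <;> omega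

-- ===== VERDICT (by name: the statement is the Claim_ definition above) =====
theorem solution_spec : Claim_equal_solution := by
  intro p loc _ hpre
  unfold Spec_solution solution solution_alt
  cases hmax : PySem.List.max? p (fun x : Int => x) with
  | none => exact absurd ((PySem.List.max?_eq_none_iff _ _).1 hmax) hpre
  | some m =>
    have hmem : m ∈ p := PySem.List.max?_mem hmax
    cases hidx : PySem.List.index? p m with
    | none => exact absurd ((PySem.List.index?_eq_none_iff _ _).1 hidx) (by simpa using hmem)
    | some k =>
      have hk := loop_spec k p.length p loc m hmax hidx
        (by
          rcases (PySem.List.index?_eq_some_iff _ _ _).1 hidx with ⟨pre, suf, hp, hlen, -⟩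
          have : p.length = pre.length + suf.length + 1 := by
            rw [hp]; simp [List.length_append]; omega
          omega)
      have halt : (match PySem.List.index? p m with
          | none => (0 : Int)
          | some k => if k = 0 ∨ loc ≥ (k : Int) then loc - (k : Int) + 1
              else if loc ≤ 0 then ((p.length : Int)) - (k : Int) + 1
              else ((p.length : Int)) - (k : Int) + loc + 1) =
          (if k = 0 ∨ loc ≥ (k : Int) then loc - (k : Int) + 1
              else if loc ≤ 0 then ((p.length : Int)) - (k : Int) + 1
              else ((p.length : Int)) - (k : Int) + loc + 1) := by rw [hidx]
      rw [hk]
      exact Eq.trans (by split_ifs <;> omega) halt.symm
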